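-- pv_equiv track=rewrite | github.com/ffyycc/Artificial_Intelligence_Projects | cs440_mp4/viterbi_1.py | make_V_n_emission_table
-- ===== SOURCE A (Python) =====
-- def make_V_n_emission_table(tag_word_list,tag_list):
--     table = {}
--     total_V = 0
--     total_n = 0
--     for tag in tag_list:
--         if (tag != 'START' and tag != 'END'):
--             V = 0
--             n = 0
--             for tag_pair in tag_word_list:
--                 if (tag_pair[0] == tag):
--                     total_V += 1
--                     total_n += tag_word_list[tag_pair]
--                     V += 1
--                     n += tag_word_list[tag_pair]
--             table[tag] = (V,n)
--     return table,total_V, total_n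
-- ===== SOURCE B (Python) =====
-- def make_V_n_emission_table(tag_word_list, tag_list):
--     # One pass over the dict grouping (count, value-sum) per tag, then O(1) lookups per tag.
--     counts = {}
--     for (tag, word), value in tag_word_list.items():
--         v, n = counts.get(tag, (0, 0))
--         counts[tag] = (v + 1, n + value)
--     table = {}
--     total_V = 0
--     total_n = 0
--     for tag in tag_list:
--         if tag != 'START' and tag != 'END':
--             v, n = counts.get(tag, (0, 0))
--             table[tag] = (v, n)
--             total_V += v
--             total_n += n
--     return table, total_V, total_n
-- ===== Notes on version B (the rewrite author's own statement) =====
-- stated objective: faster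
-- what changed: Replaces A's rescan of the whole tag_word dict for every tag with a single grouping pass that builds per-tag (count,sum) totals in a dict, then one O(1) lookup per tag.
import Mathlib
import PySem

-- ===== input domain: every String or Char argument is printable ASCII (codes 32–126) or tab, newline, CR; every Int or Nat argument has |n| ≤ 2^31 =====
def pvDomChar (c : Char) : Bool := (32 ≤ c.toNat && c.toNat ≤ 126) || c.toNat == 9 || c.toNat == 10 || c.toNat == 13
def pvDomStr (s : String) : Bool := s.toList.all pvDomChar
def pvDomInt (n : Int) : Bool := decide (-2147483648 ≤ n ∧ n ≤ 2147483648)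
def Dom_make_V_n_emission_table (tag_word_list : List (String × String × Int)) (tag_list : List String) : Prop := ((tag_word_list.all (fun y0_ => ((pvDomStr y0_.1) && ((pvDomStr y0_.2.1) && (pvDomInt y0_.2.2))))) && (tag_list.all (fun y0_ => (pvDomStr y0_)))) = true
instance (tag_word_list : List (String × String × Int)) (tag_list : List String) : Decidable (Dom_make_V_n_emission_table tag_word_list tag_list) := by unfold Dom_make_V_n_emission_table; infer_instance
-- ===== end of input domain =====

-- B replaces A's per-tag rescans of the whole tag_word dict with one grouping pass plus O(1) lookups (objective: faster).

-- ===== PORT A =====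
-- tag_word_list[tag_pair]: first-match lookup of the key (tag, word) in the association list.
-- The 0 default is unreachable in A's loop: the key looked up is always drawn from the list itself.
def pvLookup (twl : List (String × String × Int)) (k : String × String) : Int :=
  match twl with
  | [] => 0
  | (t, w, c) :: rest => if (t, w) == k then c else pvLookup rest k

def make_V_n_emission_table (tag_word_list : List (String × String × Int)) (tag_list : List String) : (List (String × Int × Int)) × Int × Int :=
  let st := tag_list.foldl
    (fun (acc : PySem.Dict String (Int × Int) × Int × Int) tag =>
      if tag != "START" && tag != "END" then
        let inner := tag_word_list.foldl
          (fun (s : Int × Int × Int × Int) p =>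
            if p.1 == tag then
              (s.1 + 1, s.2.1 + pvLookup tag_word_list (p.1, p.2.1),
               s.2.2.1 + 1, s.2.2.2 + pvLookup tag_word_list (p.1, p.2.1))
            else s)
          (acc.2.1, acc.2.2, 0, 0)
        (acc.1.insert tag (inner.2.2.1, inner.2.2.2), inner.1, inner.2.1)
      else acc)
    (PySem.Dict.empty, 0, 0)
  (st.1.items, st.2.1, st.2.2)

-- ===== PORT B =====
def make_V_n_emission_table_alt (tag_word_list : List (String × String × Int)) (tag_list : List String) : (List (String × Int × Int)) × Int × Int :=
  let counts := tag_word_list.foldl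
    (fun (d : PySem.Dict String (Int × Int)) p =>
      let pr := d.getD p.1 (0, 0)
      d.insert p.1 (pr.1 + 1, pr.2 + p.2.2))
    PySem.Dict.empty
  let st := tag_list.foldl
    (fun (acc : PySem.Dict String (Int × Int) × Int × Int) tag =>
      if tag != "START" && tag != "END" then
        let vn := counts.getD tag (0, 0)
        (acc.1.insert tag (vn.1, vn.2), acc.2.1 + vn.1, acc.2.2 + vn.2)
      else acc)
    (PySem.Dict.empty, 0, 0)
  (st.1.items, st.2.1, st.2.2)

-- ===== PRECONDITION & SPEC =====
-- Pre_ excludes association lists with duplicate (tag, word) keys: such a list does not represent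
-- any Python dict (A's tag_word_list is a dict), so no Python behaviour is being claimed there.
def Pre_make_V_n_emission_table (tag_word_list : List (String × String × Int)) (tag_list : List String) : Prop :=
  (tag_word_list.map (fun p => (p.1, p.2.1))).Nodup
instance (tag_word_list : List (String × String × Int)) (tag_list : List String) : Decidable (Pre_make_V_n_emission_table tag_word_list tag_list) := by unfold Pre_make_V_n_emission_table; infer_instance

def pvWitness_make_V_n_emission_table : (List (String × String × Int)) × List String :=
  ([("a", "x", 2), ("a", "y", 3), ("b", "x", 1)], ["a", "b", "c", "START"])

def Spec_make_V_n_emission_table (tag_word_list : List (String × String × Int)) (tag_list : List String) (out : (List (String × Int × Int)) × Int × Int) : Prop := out = make_V_n_emission_table_alt tag_word_list tag_list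
instance (tag_word_list : List (String × String × Int)) (tag_list : List String) (out : (List (String × Int × Int)) × Int × Int) : Decidable (Spec_make_V_n_emission_table tag_word_list tag_list out) := by unfold Spec_make_V_n_emission_table; infer_instance

-- ===== CLAIM (what is proved, stated in full; the proofs are below) =====
def Claim_equal_make_V_n_emission_table : Prop := ∀ (tag_word_list : List (String × String × Int)) (tag_list : List String), Dom_make_V_n_emission_table tag_word_list tag_list → Pre_make_V_n_emission_table tag_word_list tag_list → Spec_make_V_n_emission_table tag_word_list tag_list (make_V_n_emission_table tag_word_list tag_list)

-- ===== LEMMAS AND PROOFS =====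

-- per-tag count and value-sum, the common characterisation of both loops
def pvC (l : List (String × String × Int)) (tag : String) : Int :=
  match l with
  | [] => 0
  | p :: rest => (if p.1 == tag then 1 else 0) + pvC rest tag

def pvS (l : List (String × String × Int)) (tag : String) : Int :=
  match l with
  | [] => 0
  | p :: rest => (if p.1 == tag then p.2.2 else 0) + pvS rest tag

theorem pvLookup_mem (twl : List (String × String × Int)) (t w : String) (c : Int)
    (hnd : (twl.map (fun p => (p.1, p.2.1))).Nodup) (hm : (t, w, c) ∈ twl) :
    pvLookup twl (t, w) = c := by
  induction twl with
  | nil => cases hm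
  | cons q rest ih =>
    obtain ⟨qt, qw, qc⟩ := q
    simp only [List.map_cons, List.nodup_cons] at hnd
    rcases List.mem_cons.mp hm with h | h
    · cases h
      simp [pvLookup]
    · have hne : ((qt, qw) == (t, w)) = false := by
        apply beq_eq_false_iff_ne.mpr
        intro he
        apply hnd.1
        rw [he]
        exact List.mem_map.mpr ⟨(t, w, c), h, rfl⟩
      simp only [pvLookup, hne, Bool.false_eq_true, if_neg, not_false_iff]
      exact ih hnd.2 h

-- A's inner loop, characterised
theorem innerA_eq (twl : List (String × String × Int)) (tag : String)
    (hnd : (twl.map (fun p => (p.1, p.2.1))).Nodup) :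
    ∀ (l : List (String × String × Int)), (∀ p ∈ l, p ∈ twl) →
    ∀ (a b v n : Int),
      l.foldl (fun (s : Int × Int × Int × Int) p =>
        if p.1 == tag then
          (s.1 + 1, s.2.1 + pvLookup twl (p.1, p.2.1),
           s.2.2.1 + 1, s.2.2.2 + pvLookup twl (p.1, p.2.1))
        else s) (a, b, v, n)
      = (a + pvC l tag, b + pvS l tag, v + pvC l tag, n + pvS l tag) := by
  intro l
  induction l with
  | nil => intro _ a b v n; simp [pvC, pvS]
  | cons p rest ih =>
    intro hmem a b v n
    obtain ⟨pt, pw, pc⟩ := p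
    by_cases h : pt = tag
    · subst h
      have hlk : pvLookup twl (pt, pw) = pc :=
        pvLookup_mem twl pt pw pc hnd (hmem _ (List.mem_cons_self ..))
      simp only [List.foldl_cons, BEq.rfl, if_true, hlk]
      rw [ih (fun q hq => hmem q (List.mem_cons_of_mem _ hq))]
      simp only [pvC, pvS, BEq.rfl, if_true]
      refine Prod.ext (by ring) (Prod.ext (by ring) (Prod.ext (by ring) (by ring)))
    · have hb : ((pt : String) == tag) = false := by simp [h]
      simp only [List.foldl_cons, hb, Bool.false_eq_true, if_neg, not_false_iff]
      rw [ih (fun q hq => hmem q (List.mem_cons_of_mem _ hq))]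
      simp [pvC, pvS, hb]

-- B's grouping pass, characterised
theorem countsB_eq (tag : String) :
    ∀ (l : List (String × String × Int)) (d : PySem.Dict String (Int × Int)),
      (l.foldl (fun (d : PySem.Dict String (Int × Int)) p =>
        let pr := d.getD p.1 (0, 0)
        d.insert p.1 (pr.1 + 1, pr.2 + p.2.2)) d).getD tag (0, 0)
      = ((d.getD tag (0, 0)).1 + pvC l tag, (d.getD tag (0, 0)).2 + pvS l tag) := by
  intro l
  induction l with
  | nil => intro d; simp [pvC, pvS]
  | cons p rest ih =>
    intro d
    simp only [List.foldl_cons]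
    rw [ih]
    by_cases h : tag = p.1
    · rw [PySem.Dict.getD_insert]
      simp [pvC, pvS, h, Prod.ext_iff]
      constructor <;> ring
    · rw [PySem.Dict.getD_insert]
      simp only [h, if_neg, not_false_iff]
      have hb : (p.1 == tag) = false := by simp [Ne.symm h]
      simp [pvC, pvS, hb]

-- ===== VERDICT (by name: the statement is the Claim_ definition above) =====
theorem make_V_n_emission_table_spec : Claim_equal_make_V_n_emission_table := by
  intro twl tl _ hpre
  unfold Spec_make_V_n_emission_table make_V_n_emission_table make_V_n_emission_table_alt
  have hstep : ∀ (acc : PySem.Dict String (Int × Int) × Int × Int) (tag : String),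
      (if tag != "START" && tag != "END" then
        let inner := twl.foldl
          (fun (s : Int × Int × Int × Int) p =>
            if p.1 == tag then
              (s.1 + 1, s.2.1 + pvLookup twl (p.1, p.2.1),
               s.2.2.1 + 1, s.2.2.2 + pvLookup twl (p.1, p.2.1))
            else s)
          (acc.2.1, acc.2.2, 0, 0)
        (acc.1.insert tag (inner.2.2.1, inner.2.2.2), inner.1, inner.2.1)
      else acc)
      = (if tag != "START" && tag != "END" then
          let vn := (twl.foldl (fun (d : PySem.Dict String (Int × Int)) p =>
            let pr := d.getD p.1 (0, 0)
            d.insert p.1 (pr.1 + 1, pr.2 + p.2.2)) PySem.Dict.empty).getD tag (0, 0)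
          (acc.1.insert tag (vn.1, vn.2), acc.2.1 + vn.1, acc.2.2 + vn.2)
        else acc) := by
    intro acc tag
    by_cases hc : (tag != "START" && tag != "END") = true
    · simp only [hc, if_pos]
      rw [innerA_eq twl tag hpre twl (fun _ h => h) acc.2.1 acc.2.2 0 0,
          countsB_eq tag twl PySem.Dict.empty]
      simp
    · simp [hc]
  simp only []
  rw [funext fun acc => funext fun tag => hstep acc tag]
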